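-- pv_equiv track=rewrite | github.com/SilverGojo4/ANIA | src/features/visualize_cgr.py | extract_most_frequent_kmers
-- ===== SOURCE A (Python) =====
-- from collections import Counter
--
-- def extract_most_frequent_kmers(pixel_to_kmers: dict) -> dict:
--     """
--     For each pixel, keep only the most frequent k-mer.
--
--     Parameters
--     ----------
--     pixel_to_kmers : dict
--         Original mapping (row, col) -> list of k-mers.
--
--     Returns
--     -------
--     dict
--         Reduced mapping where each (row, col) maps to [most frequent k-mer].
--     """
--     new_map = {}
--     for pixel, kmer_list in pixel_to_kmers.items():
--         if not kmer_list:
--             continue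
--         counter = Counter(kmer_list)
--         most_common_kmer, _ = counter.most_common(1)[0]
--         new_map[pixel] = [most_common_kmer]
--     return new_map
-- ===== SOURCE B (Python) =====
-- def _mode_first(kmers):
--     """One left-to-right pass: track each k-mer's running count and first index,
--     keeping the current winner under the lexicographic key (count, -first_index).
--     This equals max-count with first-appearance tie-break."""
--     counts = {}
--     best_key = None
--     best = None
--     for i, k in enumerate(kmers):
--         c, f = counts.get(k, (0, i))
--         c += 1
--         counts[k] = (c, f)
--         key = (c, -f)
--         if best_key is None or key > best_key:
--             best_key, best = key, k
--     return best
--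
--
-- def extract_most_frequent_kmers(pixel_to_kmers: dict) -> dict:
--     """For each pixel, keep only the most frequent k-mer."""
--     return {pixel: [_mode_first(kmer_list)]
--             for pixel, kmer_list in pixel_to_kmers.items() if kmer_list}
-- ===== Notes on version B (the rewrite author's own statement) =====
-- stated objective: alternative
-- what changed: Replaces the two-stage Counter-then-most_common(1) per pixel by a single online pass that maintains a running (count, first_index) per k-mer and updates the current best under the lexicographic key (count, -first_index), emitted through a dict comprehension; the same mode with first-appearance tie-break is found without ever materialising the finished frequency table.
import Mathlib
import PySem

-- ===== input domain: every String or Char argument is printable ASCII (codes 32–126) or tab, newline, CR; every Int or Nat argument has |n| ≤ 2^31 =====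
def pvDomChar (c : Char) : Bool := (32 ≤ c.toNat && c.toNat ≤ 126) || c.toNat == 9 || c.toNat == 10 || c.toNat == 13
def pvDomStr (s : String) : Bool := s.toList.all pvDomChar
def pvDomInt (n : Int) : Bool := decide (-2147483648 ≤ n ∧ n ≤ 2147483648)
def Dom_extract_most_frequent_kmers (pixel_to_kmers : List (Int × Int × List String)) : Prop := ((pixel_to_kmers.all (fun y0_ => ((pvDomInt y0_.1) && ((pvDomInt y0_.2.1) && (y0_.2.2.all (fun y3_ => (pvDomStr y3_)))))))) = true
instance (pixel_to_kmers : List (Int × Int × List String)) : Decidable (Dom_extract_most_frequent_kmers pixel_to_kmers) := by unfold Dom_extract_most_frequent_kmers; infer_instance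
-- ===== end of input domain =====

-- B replaces A's Counter + most_common(1) per pixel by a single online pass (running
-- (count, first_index) per k-mer, best kept under the key (count, -first_index)); same value.

-- ===== PORT A =====
-- loop body of A: skip empty lists, else Counter + most_common(1)[0] (= first item of the counter attaining the maximal count)
def pvStepA (new_map : PySem.Dict (Int × Int) (List String)) (p : Int × Int × List String) : PySem.Dict (Int × Int) (List String) :=
  let kmer_list := p.2.2
  if kmer_list = [] then new_map
  else
    let counter := PySem.Dict.counter kmer_list
    match PySem.List.max? counter.items (fun it => it.2) with
    | none => new_map                     -- unreachable: kmer_list ≠ []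
    | some it => new_map.insert (p.1, p.2.1) [it.1]

def extract_most_frequent_kmers (pixel_to_kmers : List (Int × Int × List String)) : List (Int × Int × List String) :=
  ((pixel_to_kmers.foldl pvStepA PySem.Dict.empty).items.map (fun kv => (kv.1.1, kv.1.2, kv.2)))

-- ===== PORT B =====
-- Source B's _mode_first inner loop body: counts.get(k,(0,i)); c+=1; counts[k]=(c,f);
-- key=(c,-f); update best when best_key is None or key > best_key (Python tuple '>' = lexicographic)
def pvModeStep (st : PySem.Dict String (Int × Int) × Option (Int × Int) × Option String)
    (p : Int × String) : PySem.Dict String (Int × Int) × Option (Int × Int) × Option String :=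
  let counts := st.1
  let i := p.1
  let k := p.2
  let cf := counts.getD k (0, i)
  let c := cf.1 + 1
  let f := cf.2
  let counts' := counts.insert k (c, f)
  let key : Int × Int := (c, -f)
  match st.2.1 with
  | none => (counts', some key, some k)
  | some bk =>
      if bk.1 < key.1 ∨ (bk.1 = key.1 ∧ bk.2 < key.2) then (counts', some key, some k)
      else (counts', st.2.1, st.2.2)

def pvModeFirst (kmers : List String) : Option String :=
  ((PySem.List.enumerate kmers).foldl pvModeStep (PySem.Dict.empty, none, none)).2.2

-- the dict comprehension {pixel: [_mode_first(kl)] for pixel, kl in … if kl}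
def extract_most_frequent_kmers_alt (pixel_to_kmers : List (Int × Int × List String)) : List (Int × Int × List String) :=
  ((pixel_to_kmers.foldl
      (fun d p =>
        if p.2.2 = [] then d
        else
          match pvModeFirst p.2.2 with
          | none => d                      -- unreachable: p.2.2 ≠ []
          | some k => d.insert (p.1, p.2.1) [k])
      PySem.Dict.empty).items.map (fun kv => (kv.1.1, kv.1.2, kv.2)))

-- ===== PRECONDITION & SPEC =====
def Spec_extract_most_frequent_kmers (pixel_to_kmers : List (Int × Int × List String)) (out : List (Int × Int × List String)) : Prop := out = extract_most_frequent_kmers_alt pixel_to_kmers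
instance (pixel_to_kmers : List (Int × Int × List String)) (out : List (Int × Int × List String)) : Decidable (Spec_extract_most_frequent_kmers pixel_to_kmers out) := by unfold Spec_extract_most_frequent_kmers; infer_instance

-- ===== CLAIM (what is proved, stated in full; the proofs are below) =====
def Claim_equal_extract_most_frequent_kmers : Prop := ∀ (pixel_to_kmers : List (Int × Int × List String)), Dom_extract_most_frequent_kmers pixel_to_kmers → Spec_extract_most_frequent_kmers pixel_to_kmers (extract_most_frequent_kmers pixel_to_kmers)

-- ===== LEMMAS AND PROOFS =====

-- “the mode with first-appearance tie-break” — the value both loop bodies compute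
def pvIsBest (l : List String) (k : String) : Prop :=
  k ∈ l ∧ ∀ y ∈ l, l.count y ≤ l.count k ∧ (l.count y = l.count k → l.idxOf k ≤ l.idxOf y)

theorem pvIsBest_unique {l : List String} {a b : String}
    (ha : pvIsBest l a) (hb : pvIsBest l b) : a = b := by
  have h1 := ha.2 b hb.1
  have h2 := hb.2 a ha.1
  have hc : l.count a = l.count b := le_antisymm h2.1 h1.1
  have hi : l.idxOf a = l.idxOf b := le_antisymm (h1.2 hc.symm) (h2.2 hc)
  have ga : l[l.idxOf a]? = some a := by
    rw [List.getElem?_eq_getElem (List.idxOf_lt_length_of_mem ha.1)]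
    exact congrArg some (List.getElem_idxOf (List.idxOf_lt_length_of_mem ha.1))
  have gb : l[l.idxOf b]? = some b := by
    rw [List.getElem?_eq_getElem (List.idxOf_lt_length_of_mem hb.1)]
    exact congrArg some (List.getElem_idxOf (List.idxOf_lt_length_of_mem hb.1))
  rw [hi] at ga
  exact Option.some.inj (ga.symm.trans gb)

-- one foldl step of max? over a list extended on the right
theorem pv_max?_append_singleton {α : Type} (l : List α) (x : α) (g : α → Int) :
    PySem.List.max? (l ++ [x]) g =
      match PySem.List.max? l g with
      | none => some x
      | some m => if g m < g x then some x else some m := by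
  simp [PySem.List.max?, List.foldl_append]
  rfl

-- max? returns the FIRST extremal element
theorem pv_max?_idx {α : Type} [DecidableEq α] (g : α → Int) (l : List α) (m : α)
    (h : PySem.List.max? l g = some m) :
    ∀ y ∈ l, g y = g m → l.idxOf m ≤ l.idxOf y := by
  induction l using List.reverseRecOn with
  | nil => simp [PySem.List.max?] at h
  | append_singleton l x ih =>
      rw [pv_max?_append_singleton] at h
      cases hm : PySem.List.max? l g with
      | none =>
          have hl : l = [] := (PySem.List.max?_eq_none_iff _ _).mp hm
          subst hl
          rw [hm] at h
          simp only [Option.some.injEq] at h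
          subst h
          intro y hy _
          simp at hy
          subst hy
          exact le_refl _
      | some m0 =>
          rw [hm] at h
          by_cases hlt : g m0 < g x
          · simp only [if_pos hlt, Option.some.injEq] at h
            subst h
            have hxl : x ∉ l := fun hx =>
              absurd (PySem.List.max?_isMax hm x hx) (not_le.mpr hlt)
            intro y hy hgy
            rcases List.mem_append.mp hy with hyl | hyx
            · exact absurd (hgy ▸ PySem.List.max?_isMax hm y hyl) (not_le.mpr hlt)
            · simp at hyx; subst hyx; exact le_refl _
          · simp only [if_neg hlt, Option.some.injEq] at h
            subst h
            have hml : m0 ∈ l := PySem.List.max?_mem hm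
            rw [List.idxOf_append_of_mem hml]
            intro y hy hgy
            rcases List.mem_append.mp hy with hyl | hyx
            · rw [List.idxOf_append_of_mem hyl]; exact ih hm y hyl hgy
            · simp at hyx; subst hyx
              by_cases hxm : y ∈ l
              · rw [List.idxOf_append_of_mem hxm]; exact ih hm y hxm hgy
              · rw [List.idxOf_append_of_notMem hxm]
                exact le_trans (le_of_lt (List.idxOf_lt_length_of_mem hml)) (Nat.le_add_right _ _)

-- characterisation of A's per-pixel value
theorem pv_max?_isBest (l : List String) (m : String)
    (h : PySem.List.max? l (fun k => ((l.count k : Nat) : Int)) = some m) : pvIsBest l m := by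
  refine ⟨PySem.List.max?_mem h, fun y hy => ⟨?_, fun hc => ?_⟩⟩
  · exact_mod_cast PySem.List.max?_isMax h y hy
  · exact pv_max?_idx _ l m h y hy (by exact_mod_cast hc)

-- max? through a decorating map (pairing each element with its key) with key = .2
theorem pv_foldl_max_map {α : Type} (xs : List α) (g : α → Int) (acc : Option α) :
    List.foldl
      (fun (a : Option (α × Int)) x =>
        match a with
        | none => some x
        | some m => if m.2 < x.2 then some x else some m)
      (acc.map (fun k => (k, g k))) (xs.map (fun k => (k, g k)))
    = (List.foldl
        (fun (a : Option α) x =>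
          match a with
          | none => some x
          | some m => if g m < g x then some x else some m)
        acc xs).map (fun k => (k, g k)) := by
  induction xs generalizing acc with
  | nil => rfl
  | cons x t ih =>
      simp only [List.map_cons, List.foldl_cons]
      rw [← ih]
      congr 1
      cases acc with
      | none => rfl
      | some m => by_cases h : g m < g x <;> simp [h]

theorem pv_max?_map {α : Type} (xs : List α) (g : α → Int) :
    PySem.List.max? (xs.map (fun k => (k, g k))) (fun it => it.2)
      = (PySem.List.max? xs g).map (fun k => (k, g k)) := by
  unfold PySem.List.max?
  convert pv_foldl_max_map xs g none using 2
  funext a x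
  cases a <;> rfl

-- max? over the ordered dedup (set) of a list equals max? over the list itself
theorem pv_max?_ofList {α : Type} [DecidableEq α] (l : List α) (g : α → Int) :
    PySem.List.max? (PySem.Set.ofList l) g = PySem.List.max? l g := by
  induction l using List.reverseRecOn with
  | nil => rfl
  | append_singleton l x ih =>
      have h1 : PySem.Set.ofList (l ++ [x]) = PySem.Set.add (PySem.Set.ofList l) x := by
        simp [PySem.Set.ofList, List.foldl_append, PySem.Set.empty]
      have hof : PySem.Set.ofList (l ++ [x])
          = if x ∈ l then PySem.Set.ofList l else PySem.Set.ofList l ++ [x] := by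
        rw [h1]
        by_cases hx : x ∈ l <;>
          simp [PySem.Set.add, PySem.Set.contains, PySem.Set.mem_ofList, hx]
      rw [pv_max?_append_singleton, hof]
      by_cases hx : x ∈ l
      · rw [if_pos hx, ih]
        have hne : l ≠ [] := List.ne_nil_of_mem hx
        obtain ⟨m, hm⟩ : ∃ m, PySem.List.max? l g = some m := by
          cases h : PySem.List.max? l g with
          | none => exact absurd ((PySem.List.max?_eq_none_iff _ _).mp h) hne
          | some m => exact ⟨m, rfl⟩
        rw [hm]
        have : g x ≤ g m := PySem.List.max?_isMax hm x hx
        simp [not_lt.mpr this]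
      · rw [if_neg hx, pv_max?_append_singleton, ih]

-- pvModeStep on an explicit state (definitional unfoldings)
theorem pvModeStep_none (D : PySem.Dict String (Int × Int)) (bs : Option String) (i : Int) (k : String) :
    pvModeStep (D, none, bs) (i, k)
      = (D.insert k ((D.getD k (0, i)).1 + 1, (D.getD k (0, i)).2),
         some ((D.getD k (0, i)).1 + 1, -(D.getD k (0, i)).2), some k) := rfl

theorem pvModeStep_some (D : PySem.Dict String (Int × Int)) (bk : Int × Int) (bs : Option String) (i : Int) (k : String) :
    pvModeStep (D, some bk, bs) (i, k)
      = (if bk.1 < (D.getD k (0, i)).1 + 1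
            ∨ (bk.1 = (D.getD k (0, i)).1 + 1 ∧ bk.2 < -(D.getD k (0, i)).2) then
          (D.insert k ((D.getD k (0, i)).1 + 1, (D.getD k (0, i)).2),
            some ((D.getD k (0, i)).1 + 1, -(D.getD k (0, i)).2), some k)
        else (D.insert k ((D.getD k (0, i)).1 + 1, (D.getD k (0, i)).2), some bk, bs)) := rfl

-- the state invariant of Source B's online pass
theorem pv_mode_invariant (l : List String) :
    (∀ k, ((PySem.List.enumerate l).foldl pvModeStep (PySem.Dict.empty, none, none)).1.get? k
        = if k ∈ l then some (((l.count k : Nat) : Int), ((l.idxOf k : Nat) : Int)) else none)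
    ∧ (if l = [] then
        ((PySem.List.enumerate l).foldl pvModeStep (PySem.Dict.empty, none, none)).2 = (none, none)
      else ∃ b, pvIsBest l b ∧
        ((PySem.List.enumerate l).foldl pvModeStep (PySem.Dict.empty, none, none)).2
          = (some (((l.count b : Nat) : Int), -((l.idxOf b : Nat) : Int)), some b)) := by
  induction l using List.reverseRecOn with
  | nil =>
      refine ⟨fun k => ?_, by simp [PySem.List.enumerate]⟩
      simp [PySem.List.enumerate, PySem.Dict.get?_empty]
  | append_singleton l x ih =>
      obtain ⟨ihD, ihB⟩ := ih
      have hstep : (PySem.List.enumerate (l ++ [x])).foldl pvModeStep (PySem.Dict.empty, none, none)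
          = pvModeStep ((PySem.List.enumerate l).foldl pvModeStep (PySem.Dict.empty, none, none))
              ((l.length : Int), x) := by
        rw [PySem.List.enumerate_append]
        simp [List.foldl_append, PySem.List.enumerate_cons, PySem.List.enumerate_nil]
      have hcf : ((PySem.List.enumerate l).foldl pvModeStep (PySem.Dict.empty, none, none)).1.getD x (0, (l.length : Int))
          = (((l.count x : Nat) : Int), (((l ++ [x]).idxOf x : Nat) : Int)) := by
        by_cases hx : x ∈ l
        · rw [PySem.Dict.getD_eq_get?_getD, ihD x, if_pos hx, List.idxOf_append_of_mem hx]; rfl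
        · rw [PySem.Dict.getD_eq_get?_getD, ihD x, if_neg hx, List.idxOf_append_of_notMem hx]
          simp [List.count_eq_zero_of_not_mem hx]
      have hcx : (((l ++ [x]).count x : Nat) : Int) = ((l.count x : Nat) : Int) + 1 := by
        simp [List.count_append]
      have hcx' : (l ++ [x]).count x = l.count x + 1 := by exact_mod_cast hcx
      have hcy : ∀ y, y ≠ x → (l ++ [x]).count y = l.count y := by
        intro y hy
        simp [List.count_append, Ne.symm hy]
      have hiy : ∀ y ∈ l, (l ++ [x]).idxOf y = l.idxOf y := fun y hy =>
        List.idxOf_append_of_mem hy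
      rw [hstep, show ((PySem.List.enumerate l).foldl pvModeStep (PySem.Dict.empty, none, none))
            = (((PySem.List.enumerate l).foldl pvModeStep (PySem.Dict.empty, none, none)).1,
               ((PySem.List.enumerate l).foldl pvModeStep (PySem.Dict.empty, none, none)).2.1,
               ((PySem.List.enumerate l).foldl pvModeStep (PySem.Dict.empty, none, none)).2.2) from rfl]
      by_cases hl : l = []
      · subst hl
        simp only [show ((PySem.List.enumerate ([] : List String)).foldl pvModeStep
              (PySem.Dict.empty, none, none)).2.1 = (none : Option (Int × Int)) from rfl,
            show ((PySem.List.enumerate ([] : List String)).foldl pvModeStep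
              (PySem.Dict.empty, none, none)).2.2 = (none : Option String) from rfl]
        rw [pvModeStep_none, hcf]
        constructor
        · intro k
          rw [PySem.Dict.get?_insert]
          by_cases hk : k = x
          · subst hk
            rw [if_pos rfl, if_pos (by simp)]
            simp
          · rw [if_neg hk, if_neg (by simp [hk])]
            show ((PySem.List.enumerate ([] : List String)).foldl pvModeStep
              (PySem.Dict.empty, none, none)).1.get? k = none
            rw [show ((PySem.List.enumerate ([] : List String)).foldl pvModeStep
              (PySem.Dict.empty, none, none)).1 = PySem.Dict.empty from rfl, PySem.Dict.get?_empty]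
        · rw [if_neg (by simp : ¬([] : List String) ++ [x] = [])]
          refine ⟨x, ⟨by simp, fun y hy => ?_⟩, ?_⟩
          · simp at hy; subst hy; exact ⟨le_refl _, fun _ => le_refl _⟩
          · simp
      · have hB2 := ihB
        rw [if_neg hl] at hB2
        obtain ⟨b, hb, hB2⟩ := hB2
        have h21 : ((PySem.List.enumerate l).foldl pvModeStep (PySem.Dict.empty, none, none)).2.1
            = some (((l.count b : Nat) : Int), -((l.idxOf b : Nat) : Int)) := by rw [hB2]
        have h22 : ((PySem.List.enumerate l).foldl pvModeStep (PySem.Dict.empty, none, none)).2.2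
            = some b := by rw [hB2]
        rw [h21, h22, pvModeStep_some, hcf]
        dsimp only
        have hgoalD : ∀ k, (((PySem.List.enumerate l).foldl pvModeStep
              (PySem.Dict.empty, none, none)).1.insert x
                (((l.count x : Nat) : Int) + 1, (((l ++ [x]).idxOf x : Nat) : Int))).get? k
            = if k ∈ l ++ [x] then
                some ((((l ++ [x]).count k : Nat) : Int), (((l ++ [x]).idxOf k : Nat) : Int))
              else none := by
          intro k
          rw [PySem.Dict.get?_insert]
          by_cases hk : k = x
          · subst hk
            rw [if_pos rfl, if_pos (by simp), hcx]
          · rw [if_neg hk, ihD k]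
            by_cases hkl : k ∈ l
            · rw [if_pos hkl, if_pos (List.mem_append_left _ hkl), hcy k hk, hiy k hkl]
            · rw [if_neg hkl, if_neg (by simp [hkl, hk])]
        by_cases hcond : ((l.count b : Nat) : Int) < ((l.count x : Nat) : Int) + 1
            ∨ (((l.count b : Nat) : Int) = ((l.count x : Nat) : Int) + 1
               ∧ -((l.idxOf b : Nat) : Int) < -(((l ++ [x]).idxOf x : Nat) : Int))
        · rw [if_pos hcond]
          refine ⟨hgoalD, ?_⟩
          rw [if_neg (by simp : ¬l ++ [x] = [])]
          refine ⟨x, ⟨List.mem_append_right _ (by simp), fun y hy => ?_⟩, by rw [hcx]⟩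
          by_cases hyx : y = x
          · subst hyx; exact ⟨le_refl _, fun _ => le_refl _⟩
          · have hyl : y ∈ l := by
              rcases List.mem_append.mp hy with h | h
              · exact h
              · simp at h; exact absurd h hyx
            have hcyx : (l ++ [x]).count y = l.count y := hcy y hyx
            have hcyb : l.count y ≤ l.count b := (hb.2 y hyl).1
            rcases hcond with h1 | ⟨h2, h3⟩
            · have h1' : l.count b < l.count x + 1 := by exact_mod_cast h1
              constructor
              · rw [hcyx, hcx']; omega
              · intro htie
                exfalso
                rw [hcyx, hcx'] at htie
                omega
            · have hcb : l.count b = l.count x + 1 := by exact_mod_cast h2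
              have hfx : (l ++ [x]).idxOf x < l.idxOf b := by omega
              constructor
              · rw [hcyx, hcx']; omega
              · intro htie
                rw [hcyx, hcx'] at htie
                have htie' : l.count y = l.count b := by omega
                have hidx := (hb.2 y hyl).2 htie'
                rw [hiy y hyl]
                omega
        · rw [if_neg hcond]
          have hc1 : ((l.count x : Nat) : Int) + 1 ≤ ((l.count b : Nat) : Int) :=
            not_lt.mp (fun h => hcond (Or.inl h))
          have hc2 : ((l.count b : Nat) : Int) = ((l.count x : Nat) : Int) + 1 →
              -(((l ++ [x]).idxOf x : Nat) : Int) ≤ -((l.idxOf b : Nat) : Int) :=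
            fun he => not_lt.mp (fun h => hcond (Or.inr ⟨he, h⟩))
          have hc1' : l.count x + 1 ≤ l.count b := by exact_mod_cast hc1
          have hbx : b ≠ x := by
            intro hbx; subst hbx
            omega
          have hbl : b ∈ l := hb.1
          have hcb' : (l ++ [x]).count b = l.count b := hcy b hbx
          have hib' : (l ++ [x]).idxOf b = l.idxOf b := hiy b hbl
          refine ⟨hgoalD, ?_⟩
          rw [if_neg (by simp : ¬l ++ [x] = [])]
          refine ⟨b, ⟨List.mem_append_left _ hbl, fun y hy => ?_⟩, by rw [hcb', hib']⟩
          by_cases hyx : y = x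
          · subst hyx
            rw [hcb', hcx']
            constructor
            · omega
            · intro htie
              have hfle := hc2 (by exact_mod_cast htie.symm)
              rw [hib']
              omega
          · have hyl : y ∈ l := by
              rcases List.mem_append.mp hy with h | h
              · exact h
              · simp at h; exact absurd h hyx
            rw [hcy y hyx, hcb', hib', hiy y hyl]
            exact hb.2 y hyl

theorem pvModeFirst_eq (l : List String) :
    pvModeFirst l = PySem.List.max? l (fun k => ((l.count k : Nat) : Int)) := by
  by_cases hl : l = []
  · subst hl; rfl
  · have h2 := (pv_mode_invariant l).2
    rw [if_neg hl] at h2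
    obtain ⟨b, hb, hB2⟩ := h2
    have hpm : pvModeFirst l = some b := by unfold pvModeFirst; rw [hB2]
    rw [hpm]
    cases hm : PySem.List.max? l (fun k => ((l.count k : Nat) : Int)) with
    | none => exact absurd ((PySem.List.max?_eq_none_iff _ _).mp hm) hl
    | some m => exact congrArg some (pvIsBest_unique hb (pv_max?_isBest l m hm))

-- the two loop bodies agree
theorem pv_step_eq : pvStepA
    = fun d p =>
        if p.2.2 = [] then d
        else
          match pvModeFirst p.2.2 with
          | none => d
          | some k => d.insert (p.1, p.2.1) [k] := by
  funext d p
  unfold pvStepA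
  by_cases h : p.2.2 = []
  · simp [h]
  · simp only [if_neg h]
    rw [PySem.Dict.items_counter]
    rw [pv_max?_map, pv_max?_ofList, pvModeFirst_eq]
    cases hm : PySem.List.max? p.2.2 (fun k => ((p.2.2.count k : Nat) : Int)) with
    | none => exact absurd ((PySem.List.max?_eq_none_iff _ _).mp hm) h
    | some m => rfl

-- ===== VERDICT (by name: the statement is the Claim_ definition above) =====
theorem extract_most_frequent_kmers_spec : Claim_equal_extract_most_frequent_kmers := by
  intro m _
  unfold Spec_extract_most_frequent_kmers extract_most_frequent_kmers extract_most_frequent_kmers_alt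
  rw [pv_step_eq]
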